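-- pv_equiv track=rewrite | github.com/opendr-eu/opendr | src/opendr/perception/multimodal_human_centric/rgbd_hand_gesture_learner/algorithm/data.py | refine_label
-- ===== SOURCE A (Python) =====
-- def refine_label(labels):
--     text_labels = set()
--     for lb in labels:
--         text_labels.add('_AND_'.join(lb[2:]))
--     text_labels = list(text_labels)
--     text_labels.sort()
--     new_labels = []
--     for lb in labels:
--         text = '_AND_'.join(lb[2:])
--         idx = text_labels.index(text)
--         new_labels.append((lb[0], lb[1], text, idx))
--
--     return new_labels, text_labels
-- ===== SOURCE B (Python) =====
-- def refine_label(labels):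
--     texts = ['_AND_'.join(lb[2:]) for lb in labels]
--     distinct = set(texts)
--     new_labels = [(lb[0], lb[1], t, sum(1 for u in distinct if u < t))
--                   for lb, t in zip(labels, texts)]
--     return new_labels, sorted(distinct)
-- ===== Notes on version B (the rewrite author's own statement) =====
-- stated objective: alternative
-- what changed: A builds the sorted list of unique texts and then looks up each element's index with list.index; B never looks up an index: it computes each element's rank directly as the count of distinct texts strictly smaller than its own, in a single zip/comprehension pass over the labels.
import Mathlib
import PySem

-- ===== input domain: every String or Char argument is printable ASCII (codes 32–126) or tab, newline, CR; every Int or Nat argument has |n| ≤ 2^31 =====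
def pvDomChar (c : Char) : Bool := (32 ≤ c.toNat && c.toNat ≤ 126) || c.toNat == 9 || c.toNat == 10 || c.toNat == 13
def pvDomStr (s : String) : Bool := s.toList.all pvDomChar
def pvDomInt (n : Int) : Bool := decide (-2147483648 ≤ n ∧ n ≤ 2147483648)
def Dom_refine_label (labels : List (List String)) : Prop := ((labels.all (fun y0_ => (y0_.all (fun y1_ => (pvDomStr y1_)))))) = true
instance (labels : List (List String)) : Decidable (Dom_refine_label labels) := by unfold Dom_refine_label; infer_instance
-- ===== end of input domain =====

-- B replaces A's sorted-unique-list + per-element list.index lookup by a single rank-by-counting pass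
-- (idx = number of distinct texts strictly below this text); alternative decomposition, same asymptotic cost.

-- ===== PORT A =====
-- '_AND_'.join(lb[2:]) (shared text of both loops of A; B's port uses it too)
def pvText (lb : List String) : String :=
  PySem.Str.join "_AND_" (PySem.List.slice lb (some 2) none)

-- lb[0]/lb[1] raise IndexError for len(lb) < 2: those inputs are excluded by Pre_; inside Pre_
-- pyGetD's default "" is never used.  text_labels.index(text) never raises (text is in the set),
-- so (index? …).getD 0 is exact.
def refine_label (labels : List (List String)) : (List (String × String × String × Int)) × List String :=
  let text_set : PySem.Set String :=
    labels.foldl (fun s lb => PySem.Set.add s (pvText lb)) PySem.Set.empty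
  let text_labels := PySem.List.sorted text_set (fun x => x) false
  let new_labels :=
    labels.foldl (fun acc lb =>
      let text := pvText lb
      let idx : Int := ((PySem.List.index? text_labels text).getD 0 : Nat)
      acc ++ [(PySem.List.pyGetD lb 0 "", PySem.List.pyGetD lb 1 "", text, idx)]) []
  (new_labels, text_labels)

-- ===== PORT B =====
def refine_label_alt (labels : List (List String)) : (List (String × String × String × Int)) × List String :=
  let texts := labels.map (fun lb => pvText lb)
  let distinct : PySem.Set String := PySem.Set.ofList texts
  let new_labels :=
    (labels.zip texts).map (fun p =>
      (PySem.List.pyGetD p.1 0 "", PySem.List.pyGetD p.1 1 "", p.2,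
       (distinct.map (fun u => if u < p.2 then (1 : Int) else 0)).sum))
  (new_labels, PySem.List.sorted distinct (fun x => x) false)

-- ===== PRECONDITION & SPEC =====
-- Pre_ excludes exactly the inputs where the Python A raises IndexError (lb[0] / lb[1] on a
-- sub-list of fewer than 2 elements).
def Pre_refine_label (labels : List (List String)) : Prop :=
  ∀ lb ∈ labels, 2 ≤ lb.length
instance (labels : List (List String)) : Decidable (Pre_refine_label labels) := by
  unfold Pre_refine_label; infer_instance

def pvWitness_refine_label : List (List String) :=
  [["a", "b", "up"], ["c", "d", "up", "down"], ["e", "f", "up"]]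

def Spec_refine_label (labels : List (List String)) (out : (List (String × String × String × Int)) × List String) : Prop := out = refine_label_alt labels
instance (labels : List (List String)) (out : (List (String × String × String × Int)) × List String) : Decidable (Spec_refine_label labels out) := by unfold Spec_refine_label; infer_instance

-- ===== CLAIM (what is proved, stated in full; the proofs are below) =====
def Claim_equal_refine_label : Prop := ∀ (labels : List (List String)), Dom_refine_label labels → Pre_refine_label labels → Spec_refine_label labels (refine_label labels)

-- ===== LEMMAS AND PROOFS =====

-- In a strictly increasing list, the index of a member is the number of elements below it.
theorem index?_sorted_eq_countP {α : Type} [BEq α] [LawfulBEq α] [LinearOrder α]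
    (tl : List α) (hs : tl.Pairwise (· < ·)) (t : α) (ht : t ∈ tl) :
    PySem.List.index? tl t = some (tl.countP (fun u => decide (u < t))) := by
  induction tl with
  | nil => simp at ht
  | cons x rest ih =>
    rcases List.pairwise_cons.mp hs with ⟨hx, hrest⟩
    by_cases hxt : x = t
    · subst hxt
      have h0 : rest.countP (fun u => decide (u < x)) = 0 := by
        apply List.countP_eq_zero.mpr
        intro u hu
        simp [not_lt.mpr (le_of_lt (hx u hu))]
      rw [PySem.List.index?_cons_self]
      simp [h0]
    · have htr : t ∈ rest := by
        rcases List.mem_cons.mp ht with h | h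
        · exact absurd h.symm hxt
        · exact h
      have hxlt : x < t := hx t htr
      rw [PySem.List.index?_cons_of_ne _ hxt, ih hrest htr]
      simp [hxlt]

theorem refine_label_eq (labels : List (List String)) :
    refine_label labels = refine_label_alt labels := by
  unfold refine_label refine_label_alt
  rw [← PySem.Set.update_map_eq_foldl_add labels pvText PySem.Set.empty]
  simp only [PySem.Set.empty]
  rw [PySem.Set.update_nil_left]
  rw [PySem.List.foldl_append_singleton_eq_map, ← List.map_prod_left_eq_zip]
  rw [List.map_map]
  refine congrArg (fun nl => (nl, _)) ?_
  apply List.map_congr_left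
  intro lb hlb
  simp only [Function.comp]
  refine congrArg (fun z => (PySem.List.pyGetD lb 0 "", PySem.List.pyGetD lb 1 "", pvText lb, z)) ?_
  -- index of pvText lb in sorted(set(texts)) = #{distinct texts < pvText lb}
  set texts := labels.map pvText with htexts
  set tl := PySem.List.sorted (PySem.Set.ofList texts) (fun x => x) false with htl
  have hmem : pvText lb ∈ tl := by
    rw [htl, PySem.List.mem_sorted, PySem.Set.mem_ofList, htexts]
    exact List.mem_map_of_mem hlb
  have hidx := index?_sorted_eq_countP tl (PySem.List.sorted_ofList_pairwise_lt texts) _ hmem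
  rw [hidx]
  have hsum : ((PySem.Set.ofList texts).map (fun u => if u < pvText lb then (1 : Int) else 0)).sum
      = ((PySem.Set.ofList texts).countP (fun u => decide (u < pvText lb)) : Int) := by
    simpa using PySem.List.sum_map_ite_one_zero (fun u => decide (u < pvText lb)) (PySem.Set.ofList texts)
  rw [hsum, (PySem.List.sorted_perm (PySem.Set.ofList texts) (fun x => x) false).countP_eq]
  simp

-- ===== VERDICT (by name: the statement is the Claim_ definition above) =====
theorem refine_label_spec : Claim_equal_refine_label := by
  intro labels _ _
  unfold Spec_refine_label
  exact refine_label_eq labels
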